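-- pv_equiv track=rewrite | github.com/Spencer-Damiano/CSE-111 | budget.py | get_plasma_base
-- ===== SOURCE A (Python) =====
-- def get_plasma_base(donations):
--   donation_count = 0
--   ttl_money = 0
--
--   for i in range(donations):
--     donation_money = 25 + 5 * donation_count
--     if donation_money <= 50:
--       ttl_money += donation_money
--     elif donation_money > 50:
--       ttl_money += 50
--     donation_count += 1
--     if donation_count > donations:
--       break
--
--   return ttl_money
-- ===== SOURCE B (Python) =====
-- def get_plasma_base(donations):
--     # closed form: donation i (0-based) pays min(25 + 5*i, 50); cap reached from i = 6 on
--     if donations <= 0: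
--         return 0
--     if donations <= 6:
--         return 25 * donations + 5 * donations * (donations - 1) // 2
--     return 225 + 50 * (donations - 6)
-- ===== Notes on version B (the rewrite author's own statement) =====
-- stated objective: faster
-- what changed: replaced the per-donation loop with a closed-form arithmetic-series formula (triangular sum for the first 6 donations, 50 per donation after)
import Mathlib
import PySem

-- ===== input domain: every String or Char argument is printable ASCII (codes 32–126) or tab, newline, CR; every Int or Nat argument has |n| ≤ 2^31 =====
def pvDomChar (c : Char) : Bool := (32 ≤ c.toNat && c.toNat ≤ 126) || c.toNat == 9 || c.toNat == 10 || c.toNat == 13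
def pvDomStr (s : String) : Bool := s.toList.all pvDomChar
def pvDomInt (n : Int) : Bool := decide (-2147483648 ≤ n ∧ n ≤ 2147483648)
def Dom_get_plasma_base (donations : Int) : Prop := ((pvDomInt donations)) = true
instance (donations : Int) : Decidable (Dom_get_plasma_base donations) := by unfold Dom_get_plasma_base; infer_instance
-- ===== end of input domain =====

-- B replaces A's per-donation loop by a closed-form arithmetic sum (O(1) instead of O(n)).

-- ===== PORT A =====
-- state: (donation_count, ttl_money, broken); the loop's `break` is the flag
def get_plasma_base (donations : Int) : Int :=
  let st := (PySem.List.pyRange 0 donations 1).foldl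
    (fun (st : Int × Int × Bool) _ =>
      if st.2.2 then st
      else
        let donation_money := 25 + 5 * st.1
        let ttl :=
          if donation_money ≤ 50 then st.2.1 + donation_money
          else if donation_money > 50 then st.2.1 + 50
          else st.2.1
        let dc := st.1 + 1
        (dc, ttl, decide (dc > donations)))
    (0, 0, false)
  st.2.1

-- ===== PORT B =====
def get_plasma_base_alt (donations : Int) : Int :=
  if donations ≤ 0 then 0
  else if donations ≤ 6 then
    25 * donations + PySem.Int.floordiv (5 * donations * (donations - 1)) 2
  else 225 + 50 * (donations - 6)

-- ===== PRECONDITION & SPEC =====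
def Spec_get_plasma_base (donations : Int) (out : Int) : Prop := out = get_plasma_base_alt donations
instance (donations : Int) (out : Int) : Decidable (Spec_get_plasma_base donations out) := by unfold Spec_get_plasma_base; infer_instance

-- ===== CLAIM (what is proved, stated in full; the proofs are below) =====
def Claim_equal_get_plasma_base : Prop := ∀ (donations : Int), Dom_get_plasma_base donations → Spec_get_plasma_base donations (get_plasma_base donations)

-- ===== LEMMAS AND PROOFS =====

-- the amount the loop has accumulated after m iterations
def pvG : Nat → Int
  | 0 => 0
  | m + 1 => pvG m + (if (25 + 5 * (m : Int)) ≤ 50 then 25 + 5 * (m : Int) else 50)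

def pvStep (donations : Int) (st : Int × Int × Bool) (_ : Int) : Int × Int × Bool :=
  if st.2.2 then st
  else
    let donation_money := 25 + 5 * st.1
    let ttl :=
      if donation_money ≤ 50 then st.2.1 + donation_money
      else if donation_money > 50 then st.2.1 + 50
      else st.2.1
    let dc := st.1 + 1
    (dc, ttl, decide (dc > donations))

theorem pvLoop (donations : Int) (m : Nat) (hm : (m : Int) ≤ donations) :
    (PySem.List.pyRange 0 m 1).foldl (pvStep donations) (0, 0, false)
      = ((m : Int), pvG m, decide ((m : Int) > donations)) := by
  induction m with
  | zero =>
      simp [pvG]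
      omega
  | succ k ih =>
      have hk : (k : Int) ≤ donations := by push_cast at hm ⊢; omega
      have hkd : ¬ ((k : Int) > donations) := by omega
      have : PySem.List.pyRange 0 ((k : Int) + 1) 1
          = PySem.List.pyRange 0 (k : Int) 1 ++ [(k : Int)] := by
        exact PySem.List.pyRange_one_succ_right (by positivity)
      push_cast
      rw [this, List.foldl_append, ih hk]
      simp [pvStep, hkd, pvG]
      split_ifs <;> omega

theorem pvG_closed (m : Nat) :
    pvG m = get_plasma_base_alt (m : Int) := by
  induction m with
  | zero => decide
  | succ k ih =>
      by_cases hk : k < 7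
      · interval_cases k <;> decide
      · have h6 : 7 ≤ k := by omega
        have hk6 : (7 : Int) ≤ (k : Int) := by exact_mod_cast h6
        have hkk : ¬ ((25 : Int) + 5 * (k : Int) ≤ 50) := by linarith
        simp only [pvG, hkk, if_false, ih, get_plasma_base_alt]
        have h1 : ¬ ((k : Int) ≤ 0) := not_le.mpr (by linarith)
        have h2 : ¬ ((k : Int) ≤ 6) := not_le.mpr (by linarith)
        have h3 : ¬ (((k : Nat) + 1 : Int) ≤ 0) := not_le.mpr (by linarith)
        have h4 : ¬ (((k : Nat) + 1 : Int) ≤ 6) := not_le.mpr (by linarith)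
        push_cast
        simp only [h1, h2, if_false]
        push_cast at h3 h4
        simp only [h3, h4, if_false]
        ring

-- ===== VERDICT (by name: the statement is the Claim_ definition above) =====
theorem get_plasma_base_spec : Claim_equal_get_plasma_base := by
  intro donations _
  unfold Spec_get_plasma_base get_plasma_base
  by_cases h : donations ≤ 0
  · rw [PySem.List.pyRange_one_eq_nil h]
    simp [get_plasma_base_alt, h]
  · have h0 : 0 ≤ donations := by omega
    have hm : ((donations.toNat : Int)) = donations := Int.toNat_of_nonneg h0
    have := pvLoop donations donations.toNat (by omega)
    rw [hm] at this
    show ((PySem.List.pyRange 0 donations 1).foldl (pvStep donations) (0, 0, false)).2.1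
        = get_plasma_base_alt donations
    rw [this]
    have := pvG_closed donations.toNat
    rw [hm] at this
    exact this
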